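-- pv_equiv track=rewrite | github.com/ThiseniSenethma/Maze-Solver-DFD-Astar-using-python | MazeSolver.py | dfs
-- ===== SOURCE A (Python) =====
-- def dfs(maze, current, goal, visited):
--     x, y = current
--
--     # Checking if the current node is the goal
--     if current == goal:
--         return {'visited_nodes': [current], 'path': [current]}
--
--     visited[x][y] = True
--
--     # Checkng all possible moves in increasing order
--     moves = [
--         (x - 1, y), (x + 1, y), (x, y - 1), (x, y + 1),  # horizontal and vertical
--         (x - 1, y - 1), (x - 1, y + 1), (x + 1, y - 1), (x + 1, y + 1)  # diagonal
--     ]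
--
--     for move in moves:
--         new_x, new_y = move
--         if 0 <= new_x < len(maze) and 0 <= new_y < len(maze[0]) and maze[new_x][new_y] != '#' and not visited[new_x][new_y]:
--             path = dfs(maze, (new_x, new_y), goal, visited)
--             if path['path']:  # Checking if a path is found
--                 return {'visited_nodes': [current] + path['visited_nodes'], 'path': [current] + path['path']}
--
--     return {'visited_nodes': [current], 'path': []}  # No path found
-- ===== SOURCE B (Python) =====
-- # Iterative DFS: an explicit stack of (node, remaining-moves) frames plus a `seen`
-- # set of coordinate pairs instead of recursion over a mutated boolean grid; only
-- # the start cell is written into `visited` (A additionally marks every explored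
-- # cell there), so the in-place side effect on `visited` differs; the RETURN value
-- # is the same.
-- def dfs(maze, current, goal, visited):
--     if current == goal:
--         return {'visited_nodes': [current], 'path': [current]}
--
--     x, y = current
--     visited[x][y] = True
--     seen = {current}
--     stack = [(current, _moves(current))]
--
--     while stack:
--         node, pending = stack[-1]
--         while pending:
--             m = pending.pop(0)
--             if 0 <= m[0] < len(maze) and 0 <= m[1] < len(maze[0]) \
--                     and maze[m[0]][m[1]] != '#' and not visited[m[0]][m[1]] \
--                     and m not in seen:
--                 if m == goal:
--                     chain = [f[0] for f in stack] + [m]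
--                     return {'visited_nodes': chain, 'path': chain}
--                 seen.add(m)
--                 stack.append((m, _moves(m)))
--                 break
--         else:
--             stack.pop()
--
--     return {'visited_nodes': [current], 'path': []}
--
--
-- def _moves(pos):
--     x, y = pos
--     return [(x - 1, y), (x + 1, y), (x, y - 1), (x, y + 1),
--             (x - 1, y - 1), (x - 1, y + 1), (x + 1, y - 1), (x + 1, y + 1)]
-- ===== Notes on version B (the rewrite author's own statement) =====
-- stated objective: alternative
-- what changed: Replaces A's recursion over the in-place mutated boolean grid with an iterative machine: an explicit stack of (node, remaining-moves) frames driven by one while loop, tracking explored cells in a set of coordinate pairs instead of writing them into the grid, and building the result path directly from the stack instead of prepending at every recursive return.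
import Mathlib
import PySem

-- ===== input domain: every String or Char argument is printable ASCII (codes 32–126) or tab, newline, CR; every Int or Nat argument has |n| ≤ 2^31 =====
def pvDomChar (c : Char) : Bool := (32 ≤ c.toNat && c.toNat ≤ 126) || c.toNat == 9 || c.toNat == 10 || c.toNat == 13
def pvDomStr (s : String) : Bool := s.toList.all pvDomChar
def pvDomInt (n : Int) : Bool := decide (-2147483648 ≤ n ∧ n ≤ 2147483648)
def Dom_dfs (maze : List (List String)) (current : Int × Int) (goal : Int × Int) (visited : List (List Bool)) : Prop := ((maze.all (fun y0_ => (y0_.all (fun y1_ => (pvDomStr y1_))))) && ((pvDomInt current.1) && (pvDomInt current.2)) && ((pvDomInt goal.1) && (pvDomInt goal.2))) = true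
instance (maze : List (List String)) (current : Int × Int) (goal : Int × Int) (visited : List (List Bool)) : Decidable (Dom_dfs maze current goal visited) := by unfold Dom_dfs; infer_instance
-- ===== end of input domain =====

-- B replaces A's recursion over the mutated boolean grid with an iterative machine:
-- an explicit stack of (node, remaining-moves) frames plus a `seen` SET of coordinate
-- pairs; equivalence is about the RETURN value (Python A marks every explored cell in
-- `visited` in place, Python B writes only the start cell there).

-- ===== PORT A =====

-- the 8 candidate moves, in A's order
def movesOf (x y : Int) : List (Int × Int) :=
  [(x - 1, y), (x + 1, y), (x, y - 1), (x, y + 1),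
   (x - 1, y - 1), (x - 1, y + 1), (x + 1, y - 1), (x + 1, y + 1)]

-- visited[i][j] read; only evaluated after the 0 ≤ i/j guards, so .toNat is exact;
-- out-of-range reads default to `true` (Python raises there; such inputs are outside Pre_)
def vGet (v : List (List Bool)) (i j : Int) : Bool :=
  (v.getD i.toNat []).getD j.toNat true

-- maze[i][j] read; only evaluated after the in-bounds guards (default is never the decider inside Pre_)
def mazeGet (maze : List (List String)) (i j : Int) : String :=
  (maze.getD i.toNat []).getD j.toNat "#"

-- the move guard of A, in Python's evaluation order
def okMove (maze : List (List String)) (v : List (List Bool)) (m : Int × Int) : Bool :=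
  decide (0 ≤ m.1) && decide (m.1 < (maze.length : Int)) &&
  decide (0 ≤ m.2) && decide (m.2 < (((maze.headD []).length : Int))) &&
  (mazeGet maze m.1 m.2 != "#") && (!(vGet v m.1 m.2))

-- visited[x][y] = True with Python's negative-index wraparound; a write Python would
-- raise on (index invalid after wraparound) is a no-op here — outside Pre_
def pyWrap (n : Nat) (i : Int) : Int := if i < 0 then i + n else i

def setRow (r : List Bool) (y : Int) : List Bool :=
  if 0 ≤ pyWrap r.length y ∧ pyWrap r.length y < (r.length : Int) then
    r.set (pyWrap r.length y).toNat true
  else r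

def markWrap (v : List (List Bool)) (x y : Int) : List (List Bool) :=
  if 0 ≤ pyWrap v.length x ∧ pyWrap v.length x < (v.length : Int) then
    v.modify (pyWrap v.length x).toNat (fun r => setRow r y)
  else v

-- number of unvisited flags: the termination measure of port A
def cntF (v : List (List Bool)) : Nat := (v.map (fun r => r.count false)).sum

lemma count_false_set_le (r : List Bool) (j : Nat) :
    (r.set j true).count false ≤ r.count false := by
  induction r generalizing j with
  | nil => simp
  | cons a t ih =>
    cases j with
    | zero => cases a <;> simp
    | succ j => cases a <;> simpa using ih j

lemma count_false_set_lt (r : List Bool) (j : Nat) (hj : r.getD j true = false) :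
    (r.set j true).count false < r.count false := by
  induction r generalizing j with
  | nil => simp at hj
  | cons a t ih =>
    cases j with
    | zero => simp at hj; subst hj; simp
    | succ j =>
      have := ih j (by simpa using hj)
      cases a <;> simpa using this

lemma setRow_count_le (r : List Bool) (y : Int) : (setRow r y).count false ≤ r.count false := by
  unfold setRow
  split
  · exact count_false_set_le _ _
  · exact le_refl _

lemma cntF_modify_le (v : List (List Bool)) (i : Nat) (y : Int) :
    cntF (v.modify i (fun r => setRow r y)) ≤ cntF v := by
  induction v generalizing i with
  | nil => simp [cntF]
  | cons r t ih =>
    cases i with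
    | zero => simpa [cntF, List.modify_zero_cons] using setRow_count_le r y
    | succ i => simpa [cntF, List.modify_succ_cons] using ih i

lemma cnt_mark_le (v : List (List Bool)) (x y : Int) : cntF (markWrap v x y) ≤ cntF v := by
  unfold markWrap
  split
  · exact cntF_modify_le _ _ _
  · exact le_refl _

lemma setRow_count_lt (r : List Bool) (y : Int) (hy : 0 ≤ y) (h : r.getD y.toNat true = false) :
    (setRow r y).count false < r.count false := by
  have hlen : y.toNat < r.length := by
    by_contra hge
    rw [List.getD_eq_getElem?_getD, getElem?_neg _ _ (by omega), Option.getD_none] at h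
    simp at h
  have hp : pyWrap r.length y = y := by unfold pyWrap; rw [if_neg (by omega)]
  unfold setRow
  rw [hp, if_pos ⟨hy, by omega⟩]
  exact count_false_set_lt _ _ h

lemma cntF_modify_lt (v : List (List Bool)) (i : Nat) (y : Int) (hy : 0 ≤ y)
    (hi : i < v.length) (h : (v.getD i []).getD y.toNat true = false) :
    cntF (v.modify i (fun r => setRow r y)) < cntF v := by
  induction v generalizing i with
  | nil => simp at hi
  | cons r t ih =>
    cases i with
    | zero =>
      have := setRow_count_lt r y hy (by simpa using h)
      simp only [cntF, List.modify_zero_cons, List.map, List.sum_cons]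
      omega
    | succ i =>
      have := ih i (by simpa using hi) (by simpa using h)
      simp only [cntF, List.modify_succ_cons, List.map, List.sum_cons] at this ⊢
      omega

lemma cnt_mark_lt (v : List (List Bool)) (x y : Int) (hx : 0 ≤ x) (hy : 0 ≤ y)
    (h : vGet v x y = false) : cntF (markWrap v x y) < cntF v := by
  unfold vGet at h
  have hxlen : x.toNat < v.length := by
    by_contra hge
    have hrow : v.getD x.toNat [] = [] := by
      rw [List.getD_eq_getElem?_getD, getElem?_neg v x.toNat (by omega)]; rfl
    rw [hrow] at h
    simp at h
  have hp : pyWrap v.length x = x := by unfold pyWrap; rw [if_neg (by omega)]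
  unfold markWrap
  rw [hp, if_pos ⟨hx, by omega⟩]
  exact cntF_modify_lt v x.toNat y hy hxlen h

lemma okMove_mark_lt (maze : List (List String)) (v : List (List Bool)) (m : Int × Int)
    (h : okMove maze v m = true) : cntF (markWrap v m.1 m.2) < cntF v := by
  unfold okMove at h
  simp only [Bool.and_eq_true, decide_eq_true_eq, Bool.not_eq_true'] at h
  exact cnt_mark_lt v m.1 m.2 h.1.1.1.1.1 h.1.1.1.2 h.2

-- A is recursive; the `visited[x][y] = True` a callee performs at entry is applied at the
-- call site (markWrap is passed in), which yields the same values step for step (the only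
-- divergence would be a mark on the goal cell, after which A returns without reading it).
-- The subtype carries the monotonicity of the visited flags, needed for termination.
mutual
  -- body of one recursive call of A after the goal test = the `for move in moves` loop
  def loopA (maze : List (List String)) (goal : Int × Int) (c : Int × Int)
      (ms : List (Int × Int)) (v : List (List Bool)) :
      {rv : ((List (Int × Int) × List (Int × Int)) × List (List Bool)) // cntF rv.2 ≤ cntF v} :=
    match ms with
    | [] => ⟨(([c], []), v), le_refl _⟩                       -- no path found
    | m :: rest =>
      if hok : okMove maze v m = true then
        match dfsA maze goal m (markWrap v m.1 m.2) with
        | ⟨((vn, p), v'), hle⟩ =>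
          if p.isEmpty then
            match loopA maze goal c rest v' with
            | ⟨rv, h2⟩ =>
              ⟨rv, le_trans h2 (le_trans hle (cnt_mark_le v m.1 m.2))⟩
          else ⟨((c :: vn, c :: p), v'), le_trans hle (cnt_mark_le v m.1 m.2)⟩
      else loopA maze goal c rest v
  termination_by (cntF v, ms.length)
  decreasing_by
    all_goals first
      | exact Prod.Lex.left _ _ (okMove_mark_lt maze v m hok)
      | exact Prod.Lex.left _ _ (lt_of_le_of_lt hle (okMove_mark_lt maze v m hok))
      | exact Prod.Lex.right _ (by simp only [List.length_cons]; omega)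

  -- one recursive call of A (entry: goal test; `v` already carries the entry mark)
  def dfsA (maze : List (List String)) (goal : Int × Int) (c : Int × Int)
      (v : List (List Bool)) :
      {rv : ((List (Int × Int) × List (Int × Int)) × List (List Bool)) // cntF rv.2 ≤ cntF v} :=
    if c = goal then ⟨(([c], [c]), v), le_refl _⟩
    else loopA maze goal c (movesOf c.1 c.2) v
  termination_by (cntF v, 9)
  decreasing_by
    · exact Prod.Lex.right _ (by simp [movesOf])
end

def dfs (maze : List (List String)) (current : Int × Int) (goal : Int × Int)
    (visited : List (List Bool)) : List (String × List (Int × Int)) :=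
  if current = goal then [("visited_nodes", [current]), ("path", [current])]
  else
    [("visited_nodes",
      (loopA maze goal current (movesOf current.1 current.2)
        (markWrap visited current.1 current.2)).val.1.1),
     ("path",
      (loopA maze goal current (movesOf current.1 current.2)
        (markWrap visited current.1 current.2)).val.1.2)]

-- ===== PORT B =====

-- _moves(pos): the same 8 candidate moves, taken from the pair
def bMoves (p : Int × Int) : List (Int × Int) :=
  [(p.1 - 1, p.2), (p.1 + 1, p.2), (p.1, p.2 - 1), (p.1, p.2 + 1),
   (p.1 - 1, p.2 - 1), (p.1 - 1, p.2 + 1), (p.1 + 1, p.2 - 1), (p.1 + 1, p.2 + 1)]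

-- B's move guard: the array reads are against the caller's grid (with the start marked),
-- and freshness is a membership test in the `seen` set
def bOk (maze : List (List String)) (vb : List (List Bool))
    (seen : PySem.Set (Int × Int)) (m : Int × Int) : Bool :=
  decide (0 ≤ m.1) && decide (m.1 < (maze.length : Int)) &&
  decide (0 ≤ m.2) && decide (m.2 < (((maze.headD []).length : Int))) &&
  (mazeGet maze m.1 m.2 != "#") && (!(vGet vb m.1 m.2)) &&
  (!(PySem.Set.contains seen m))

-- the in-bounds coordinates, and how many of them are not yet in `seen`
-- (the termination measure of port B: every pushed move is a fresh in-bounds pair)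
def cellsB (maze : List (List String)) : List (Int × Int) :=
  (List.range maze.length).flatMap
    (fun i : Nat =>
      (List.range (maze.headD []).length).map (fun j : Nat => ((i : Int), (j : Int))))

def freeB (maze : List (List String)) (seen : PySem.Set (Int × Int)) : Nat :=
  ((cellsB maze).filter (fun c => !(PySem.Set.contains seen c))).length

lemma filter_len_le {α : Type} (L : List α) (p q : α → Bool)
    (h : ∀ c, q c = true → p c = true) : (L.filter q).length ≤ (L.filter p).length := by
  induction L with
  | nil => simp
  | cons a t ih =>
    by_cases hq : q a = true
    · rw [List.filter_cons_of_pos hq, List.filter_cons_of_pos (h a hq)]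
      simpa using ih
    · rw [List.filter_cons_of_neg (by simpa using hq)]
      cases hp : p a
      · rw [List.filter_cons_of_neg (by simp [hp])]; exact ih
      · rw [List.filter_cons_of_pos hp]; simp; omega

lemma filter_len_lt {α : Type} (L : List α) (p q : α → Bool) (m : α)
    (h : ∀ c, q c = true → p c = true) (hm : m ∈ L) (hp : p m = true) (hq : q m = false) :
    (L.filter q).length < (L.filter p).length := by
  induction L with
  | nil => simp at hm
  | cons a t ih =>
    rcases List.mem_cons.mp hm with rfl | hmt
    · rw [List.filter_cons_of_neg (by simp [hq]), List.filter_cons_of_pos hp]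
      have := filter_len_le t p q h
      simp; omega
    · have := ih hmt
      by_cases hqa : q a = true
      · rw [List.filter_cons_of_pos hqa, List.filter_cons_of_pos (h a hqa)]
        simpa using this
      · rw [List.filter_cons_of_neg (by simpa using hqa)]
        cases hpa : p a
        · rw [List.filter_cons_of_neg (by simp [hpa])]; exact this
        · rw [List.filter_cons_of_pos hpa]; simp; omega

lemma contains_add_bool (s : PySem.Set (Int × Int)) (m p : Int × Int) :
    PySem.Set.contains (PySem.Set.add s m) p
      = (PySem.Set.contains s p || decide (p = m)) := by
  cases hc : PySem.Set.contains (PySem.Set.add s m) p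
  · have hnm : ¬ p ∈ PySem.Set.add s m := fun h => by
      rw [(PySem.Set.contains_iff _ _).mpr h] at hc; simp at hc
    rw [PySem.Set.mem_add] at hnm
    have hns : p ∉ s := fun hh => hnm (Or.inl hh)
    have hne : p ≠ m := fun hh => hnm (Or.inr hh)
    have h1 : PySem.Set.contains s p = false := by
      cases hs : PySem.Set.contains s p
      · rfl
      · exact absurd ((PySem.Set.contains_iff _ _).mp hs) hns
    rw [h1]
    simp [hne]
  · have hm : p ∈ PySem.Set.add s m := (PySem.Set.contains_iff _ _).mp hc
    rw [PySem.Set.mem_add] at hm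
    rcases hm with hs | rfl
    · rw [(PySem.Set.contains_iff _ _).mpr hs]; simp
    · simp

lemma mem_cellsB (maze : List (List String)) (m : Int × Int)
    (h1 : 0 ≤ m.1) (h2 : m.1 < (maze.length : Int))
    (h3 : 0 ≤ m.2) (h4 : m.2 < (((maze.headD []).length : Int))) : m ∈ cellsB maze := by
  unfold cellsB
  have e1 : m.1.toNat ∈ List.range maze.length := List.mem_range.mpr (by omega)
  have e2 : m.2.toNat ∈ List.range (maze.headD []).length := List.mem_range.mpr (by omega)
  have e3 : ((m.1.toNat : Int), (m.2.toNat : Int)) = m := by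
    obtain ⟨a, b⟩ := m
    simp only at h1 h3 ⊢
    rw [Int.toNat_of_nonneg h1, Int.toNat_of_nonneg h3]
  have : m ∈ (List.range (maze.headD []).length).map
      (fun j : Nat => ((m.1.toNat : Int), (j : Int))) :=
    List.mem_map.mpr ⟨m.2.toNat, e2, e3⟩
  exact List.mem_flatMap.mpr ⟨m.1.toNat, e1, this⟩

lemma bOk_fresh_lt (maze : List (List String)) (vb : List (List Bool))
    (seen : PySem.Set (Int × Int)) (m : Int × Int) (h : bOk maze vb seen m = true) :
    freeB maze (PySem.Set.add seen m) < freeB maze seen := by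
  unfold bOk at h
  simp only [Bool.and_eq_true, decide_eq_true_eq, Bool.not_eq_true'] at h
  obtain ⟨⟨⟨⟨⟨⟨h1, h2⟩, h3⟩, h4⟩, -⟩, -⟩, hns⟩ := h
  unfold freeB
  have hnm : m ∉ seen := fun hm => by
    rw [(PySem.Set.contains_iff _ _).mpr hm] at hns; cases hns
  refine filter_len_lt _ _ _ m ?_ (mem_cellsB maze m h1 h2 h3 h4) (by simp [hnm]) ?_
  · intro c hc
    rw [contains_add_bool] at hc
    simp only [Bool.not_or, Bool.and_eq_true, Bool.not_eq_true'] at hc ⊢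
    exact hc.1
  · rw [contains_add_bool]
    simp

-- the while loop over the explicit stack of frames; the head of the list is Python's
-- stack top, and `pending.pop(0)` is the step from (c, m :: rest) to (c, rest)
def machineB (maze : List (List String)) (vb : List (List Bool)) (goal start : Int × Int)
    (stack : List ((Int × Int) × List (Int × Int))) (seen : PySem.Set (Int × Int)) :
    List (Int × Int) × List (Int × Int) :=
  match stack with
  | [] => ([start], [])                                       -- stack exhausted: no path
  | (c, pending) :: fs =>
    match pending with
    | [] => machineB maze vb goal start fs seen               -- frame exhausted: pop
    | m :: rest =>
      if bOk maze vb seen m = true then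
        if m = goal then
          -- bottom-to-top chain of the stack's nodes plus the goal
          ((((c, rest) :: fs).map Prod.fst).reverse ++ [m],
           (((c, rest) :: fs).map Prod.fst).reverse ++ [m])
        else machineB maze vb goal start ((m, bMoves m) :: (c, rest) :: fs)
          (PySem.Set.add seen m)                              -- remember and push
      else machineB maze vb goal start ((c, rest) :: fs) seen -- skip move
termination_by (freeB maze seen, (stack.map (fun f => f.2.length)).sum + stack.length)
decreasing_by
  all_goals first
    | exact Prod.Lex.left _ _ (bOk_fresh_lt maze vb seen m (by assumption))
    | exact Prod.Lex.right _ (by simp)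

def dfs_alt (maze : List (List String)) (current : Int × Int) (goal : Int × Int)
    (visited : List (List Bool)) : List (String × List (Int × Int)) :=
  if current = goal then [("visited_nodes", [current]), ("path", [current])]
  else
    [("visited_nodes",
      (machineB maze (markWrap visited current.1 current.2) goal current
        [(current, bMoves current)] (PySem.Set.ofList [current])).1),
     ("path",
      (machineB maze (markWrap visited current.1 current.2) goal current
        [(current, bMoves current)] (PySem.Set.ofList [current])).2)]

-- ===== PRECONDITION & SPEC =====
-- Pre_ excludes inputs whose start index is invalid for `visited` under Python indexing, and
-- maze/visited shapes that do not cover the maze's len(maze) × len(maze[0]) rectangle: on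
-- those A usually raises IndexError, and whether it instead happens to return (because the
-- search never reaches a missing cell) is not a closed-form condition on the input; B's
-- Python returns the same values as A on all of them.
def Pre_dfs (maze : List (List String)) (current : Int × Int) (goal : Int × Int)
    (visited : List (List Bool)) : Prop :=
  current = goal ∨
  ((let xi : Int := if current.1 < 0 then current.1 + visited.length else current.1
    0 ≤ xi ∧ xi < (visited.length : Int) ∧
    (let r := visited.getD xi.toNat []
     let yi : Int := if current.2 < 0 then current.2 + r.length else current.2
     0 ≤ yi ∧ yi < (r.length : Int))) ∧
   (∀ r ∈ maze, (maze.headD []).length ≤ r.length) ∧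
   maze.length ≤ visited.length ∧
   (∀ r ∈ visited, (maze.headD []).length ≤ r.length))

instance (maze : List (List String)) (current : Int × Int) (goal : Int × Int) (visited : List (List Bool)) : Decidable (Pre_dfs maze current goal visited) := by unfold Pre_dfs; infer_instance

def pvWitness_dfs : List (List String) × (Int × Int) × (Int × Int) × List (List Bool) :=
  ([[".", "."], [".", "#"]], (0, 0), (1, 0), [[false, false], [false, false]])

def Spec_dfs (maze : List (List String)) (current : Int × Int) (goal : Int × Int) (visited : List (List Bool)) (out : List (String × List (Int × Int))) : Prop := out = dfs_alt maze current goal visited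
instance (maze : List (List String)) (current : Int × Int) (goal : Int × Int) (visited : List (List Bool)) (out : List (String × List (Int × Int))) : Decidable (Spec_dfs maze current goal visited out) := by unfold Spec_dfs; infer_instance

-- ===== CLAIM (what is proved, stated in full; the proofs are below) =====
def Claim_equal_dfs : Prop := ∀ (maze : List (List String)) (current : Int × Int) (goal : Int × Int) (visited : List (List Bool)), Dom_dfs maze current goal visited → Pre_dfs maze current goal visited → Spec_dfs maze current goal visited (dfs maze current goal visited)

-- ===== LEMMAS AND PROOFS =====

-- ghost A-side machine (proof helper only): the same stack discipline as machineB but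
-- threading A's mutated grid; it is related to loopA below and to machineB via a coupling
def machineV (maze : List (List String)) (goal start : Int × Int)
    (stack : List ((Int × Int) × List (Int × Int))) (v : List (List Bool)) :
    List (Int × Int) × List (Int × Int) :=
  match stack with
  | [] => ([start], [])
  | (c, ms) :: fs =>
    match ms with
    | [] => machineV maze goal start fs v
    | m :: rest =>
      if okMove maze v m = true then
        if m = goal then
          ((((c, rest) :: fs).map Prod.fst).reverse ++ [m],
           (((c, rest) :: fs).map Prod.fst).reverse ++ [m])
        else machineV maze goal start ((m, movesOf m.1 m.2) :: (c, rest) :: fs)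
          (markWrap v m.1 m.2)
      else machineV maze goal start ((c, rest) :: fs) v
termination_by (cntF v, (stack.map (fun f => f.2.length)).sum + stack.length)
decreasing_by
  all_goals first
    | exact Prod.Lex.left _ _ (okMove_mark_lt maze v m (by assumption))
    | exact Prod.Lex.right _ (by simp)

-- A-side continuation of a pending stack of frames: what the suspended enclosing loops of A
-- do with the result of the innermost call
def Kc (maze : List (List String)) (goal start : Int × Int) :
    List ((Int × Int) × List (Int × Int)) →
    ((List (Int × Int) × List (Int × Int)) × List (List Bool)) →
    List (Int × Int) × List (Int × Int)
  | [], ((vn, p), _) => if p.isEmpty then ([start], []) else (vn, p)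
  | (c, ms) :: fs, ((vn, p), v) =>
    if p.isEmpty then Kc maze goal start fs (loopA maze goal c ms v).val
    else Kc maze goal start fs ((c :: vn, c :: p), v)

def KK (maze : List (List String)) (goal start : Int × Int)
    (stack : List ((Int × Int) × List (Int × Int))) (v : List (List Bool)) :
    List (Int × Int) × List (Int × Int) :=
  match stack with
  | [] => ([start], [])
  | (c, ms) :: fs => Kc maze goal start fs (loopA maze goal c ms v).val

lemma Kc_pop (maze : List (List String)) (goal start : Int × Int)
    (fs : List ((Int × Int) × List (Int × Int))) (vn : List (Int × Int)) (v : List (List Bool)) :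
    Kc maze goal start fs ((vn, []), v) = KK maze goal start fs v := by
  cases fs with
  | nil => simp [Kc, KK]
  | cons f fs => obtain ⟨c, ms⟩ := f; simp [Kc, KK]

lemma Kc_succ (maze : List (List String)) (goal start : Int × Int)
    (fs : List ((Int × Int) × List (Int × Int))) (vn p : List (Int × Int)) (v : List (List Bool))
    (hp : p ≠ []) :
    Kc maze goal start fs ((vn, p), v) =
      ((fs.map Prod.fst).reverse ++ vn, (fs.map Prod.fst).reverse ++ p) := by
  induction fs generalizing vn p v with
  | nil => simp [Kc, hp]
  | cons f fs ih =>
    obtain ⟨c, ms⟩ := f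
    have hpe : p.isEmpty = false := by
      cases p with
      | nil => exact absurd rfl hp
      | cons a q => rfl
    simp only [Kc, hpe, Bool.false_eq_true, if_false]
    rw [ih (c :: vn) (c :: p) v (by simp)]
    simp

lemma loopA_fail (maze : List (List String)) (goal c : Int × Int) :
    ∀ (ms : List (Int × Int)) (v : List (List Bool)),
      ((loopA maze goal c ms v).val.1.2).isEmpty = true →
      (loopA maze goal c ms v).val.1.1 = [c] := by
  intro ms
  induction ms with
  | nil => intro v _; simp [loopA]
  | cons m rest ih =>
    intro v h
    simp only [loopA] at h ⊢
    by_cases hok : okMove maze v m = true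
    · rw [dif_pos hok] at h ⊢
      by_cases hp : ((dfsA maze goal m (markWrap v m.1 m.2)).val.1.2).isEmpty = true
      · simp only [hp, if_true] at h ⊢
        exact ih _ h
      · simp only [hp] at h
        simp at h
    · rw [dif_neg hok] at h ⊢
      exact ih v h

-- one-step val-level unfoldings of the two A-side functions (no subtype proofs left)
lemma dfsA_val (maze : List (List String)) (goal c : Int × Int) (v : List (List Bool)) :
    (dfsA maze goal c v).val =
      if c = goal then (([c], [c]), v)
      else (loopA maze goal c (movesOf c.1 c.2) v).val := by
  by_cases h : c = goal <;> simp [dfsA, h]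

lemma loopA_cons (maze : List (List String)) (goal c m : Int × Int)
    (rest : List (Int × Int)) (v : List (List Bool)) :
    (loopA maze goal c (m :: rest) v).val =
      if okMove maze v m = true then
        (if ((dfsA maze goal m (markWrap v m.1 m.2)).val.1.2).isEmpty = true then
          (loopA maze goal c rest ((dfsA maze goal m (markWrap v m.1 m.2)).val.2)).val
         else ((c :: (dfsA maze goal m (markWrap v m.1 m.2)).val.1.1,
                c :: (dfsA maze goal m (markWrap v m.1 m.2)).val.1.2),
               (dfsA maze goal m (markWrap v m.1 m.2)).val.2))
      else (loopA maze goal c rest v).val := by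
  simp only [loopA]
  by_cases hok : okMove maze v m = true
  · rw [dif_pos hok, if_pos hok]
    by_cases hp : ((dfsA maze goal m (markWrap v m.1 m.2)).val.1.2).isEmpty = true
    · rw [if_pos hp, if_pos hp]
    · rw [if_neg hp, if_neg hp]
  · rw [dif_neg hok, if_neg hok]

lemma machineV_KK (maze : List (List String)) (goal start : Int × Int) :
    ∀ (stack : List ((Int × Int) × List (Int × Int))) (v : List (List Bool)),
      machineV maze goal start stack v = KK maze goal start stack v := by
  intro stack v
  fun_induction machineV maze goal start stack v with
  | case1 v => simp [KK]
  | case2 v c fs ih =>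
    have hb : (loopA maze goal c [] v).val = (([c], []), v) := by simp [loopA]
    simp only [KK]
    rw [hb, Kc_pop, ih]
  | case3 v c fs rest hok =>
    simp only [KK]
    rw [loopA_cons, if_pos hok, dfsA_val, if_pos (rfl : goal = goal)]
    simp only [List.isEmpty_cons, Bool.false_eq_true, if_false]
    rw [Kc_succ maze goal start fs (c :: [goal]) (c :: [goal])
      (markWrap v goal.1 goal.2) (by simp)]
    simp
  | case4 v c fs m rest hok hm ih =>
    rw [ih]
    simp only [KK]
    rw [loopA_cons, if_pos hok, dfsA_val, if_neg hm]
    rcases hL : (loopA maze goal m (movesOf m.1 m.2) (markWrap v m.1 m.2)).val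
      with ⟨⟨vn, p⟩, v'⟩
    simp only [Kc]
    by_cases hp : p.isEmpty = true
    · simp [hp]
    · simp [hp]
  | case5 v c fs m rest hok ih =>
    rw [ih]
    simp only [KK]
    rw [loopA_cons, if_neg hok]

-- coupling: A's threaded grid `v` is B's base grid `vb` plus exactly the pairs in `seen`
def Cpl (vb v : List (List Bool)) (seen : PySem.Set (Int × Int)) : Prop :=
  ∀ p : Int × Int, 0 ≤ p.1 → 0 ≤ p.2 →
    vGet v p.1 p.2 = (vGet vb p.1 p.2 || PySem.Set.contains seen p)

lemma ok_eq (maze : List (List String)) (vb v : List (List Bool))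
    (seen : PySem.Set (Int × Int)) (h : Cpl vb v seen) (m : Int × Int) :
    bOk maze vb seen m = okMove maze v m := by
  unfold bOk okMove
  by_cases h1 : (0 : Int) ≤ m.1
  · by_cases h2 : (0 : Int) ≤ m.2
    · have hc := h m h1 h2
      rw [hc]
      simp [Bool.not_or, Bool.and_assoc]
    · simp [h2]
  · simp [h1]

lemma vGet_mark (v : List (List Bool)) (x y a b : Int)
    (hx : 0 ≤ x) (hy : 0 ≤ y) (ha : 0 ≤ a) (hb : 0 ≤ b)
    (hf : vGet v x y = false) :
    vGet (markWrap v x y) a b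
      = (vGet v a b || (decide (a = x) && decide (b = y))) := by
  unfold vGet at hf ⊢
  have hxlen : x.toNat < v.length := by
    by_contra hge
    have hrow : v.getD x.toNat [] = [] := by
      rw [List.getD_eq_getElem?_getD, getElem?_neg v x.toNat (by omega)]; rfl
    rw [hrow] at hf; simp at hf
  have hylen : y.toNat < (v.getD x.toNat []).length := by
    by_contra hge
    set r := v.getD x.toNat [] with hr
    rw [List.getD_eq_getElem?_getD, getElem?_neg r y.toNat (by omega), Option.getD_none] at hf
    exact absurd hf (by simp)
  have hpx : pyWrap v.length x = x := by unfold pyWrap; rw [if_neg (by omega)]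
  have hrowD : v.getD x.toNat [] = v[x.toNat] := by
    rw [List.getD_eq_getElem?_getD, getElem?_pos v x.toNat hxlen]; rfl
  have hsr : setRow (v.getD x.toNat []) y = (v.getD x.toNat []).set y.toNat true := by
    unfold setRow
    have hpy : pyWrap (v.getD x.toNat []).length y = y := by
      unfold pyWrap; rw [if_neg (by omega)]
    rw [hpy, if_pos ⟨hy, by omega⟩]
  unfold markWrap
  rw [hpx, if_pos ⟨hx, by omega⟩]
  by_cases hax : a = x
  · subst hax
    have hgm : (v.modify a.toNat (fun r => setRow r y)).getD a.toNat []
        = setRow (v.getD a.toNat []) y := by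
      rw [hrowD, List.getD_eq_getElem?_getD, List.getElem?_modify,
        getElem?_pos v a.toNat hxlen]
      show (if a.toNat = a.toNat then setRow v[a.toNat] y else v[a.toNat])
        = setRow v[a.toNat] y
      rw [if_pos rfl]
    rw [hgm, hsr]
    by_cases hby : b = y
    · subst hby
      rw [List.getD_eq_getElem?_getD, List.getElem?_set, if_pos rfl,
        if_pos (by simpa [List.length_set] using hylen)]
      simp
    · have hbn : y.toNat ≠ b.toNat := by omega
      rw [List.getD_eq_getElem?_getD, List.getElem?_set, if_neg hbn,
        ← List.getD_eq_getElem?_getD]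
      simp [hby]
  · have hxn : x.toNat ≠ a.toNat := by omega
    have hgm : (v.modify x.toNat (fun r => setRow r y)).getD a.toNat []
        = v.getD a.toNat [] := by
      rw [List.getD_eq_getElem?_getD, List.getElem?_modify, List.getD_eq_getElem?_getD]
      cases v[a.toNat]? with
      | none => rfl
      | some r =>
        show (if x.toNat = a.toNat then setRow r y else r) = r
        rw [if_neg hxn]
    rw [hgm]
    simp [hax]

lemma Cpl_step (maze : List (List String)) (vb v : List (List Bool))
    (seen : PySem.Set (Int × Int)) (m : Int × Int)
    (h : Cpl vb v seen) (hok : okMove maze v m = true) :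
    Cpl vb (markWrap v m.1 m.2) (PySem.Set.add seen m) := by
  unfold okMove at hok
  simp only [Bool.and_eq_true, decide_eq_true_eq, Bool.not_eq_true'] at hok
  obtain ⟨⟨⟨⟨⟨h1, -⟩, h3⟩, -⟩, -⟩, hf⟩ := hok
  intro p hp1 hp2
  rw [vGet_mark v m.1 m.2 p.1 p.2 h1 h3 hp1 hp2 hf, h p hp1 hp2, contains_add_bool]
  have hdp : (decide (p.1 = m.1) && decide (p.2 = m.2)) = decide (p = m) := by
    by_cases he : p = m
    · simp [he]
    · have : ¬ (p.1 = m.1 ∧ p.2 = m.2) := fun ⟨e1, e2⟩ => he (Prod.ext e1 e2)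
      by_cases e1 : p.1 = m.1
      · have e2 : ¬ p.2 = m.2 := fun e2 => this ⟨e1, e2⟩
        simp [e1, e2, he]
      · simp [e1, he]
  rw [hdp]
  cases vGet vb p.1 p.2 <;> cases PySem.Set.contains seen p <;> cases hq : decide (p = m) <;> simp

lemma machineB_eq_V (maze : List (List String)) (vb : List (List Bool))
    (goal start : Int × Int) :
    ∀ (stack : List ((Int × Int) × List (Int × Int))) (seen : PySem.Set (Int × Int))
      (v : List (List Bool)), Cpl vb v seen →
      machineB maze vb goal start stack seen = machineV maze goal start stack v := by
  intro stack seen v h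
  fun_induction machineB maze vb goal start stack seen generalizing v with
  | case1 seen => simp [machineV]
  | case2 seen c fs ih =>
    rw [ih v h]
    simp [machineV]
  | case3 seen c fs rest hok =>
    have hokv : okMove maze v goal = true := by
      rw [← ok_eq maze vb v seen h goal]; exact hok
    simp only [machineV]
    rw [if_pos hokv]
    simp
  | case4 seen c fs m rest hok hm ih =>
    have hokv : okMove maze v m = true := by rw [← ok_eq maze vb v seen h m]; exact hok
    have hstep := Cpl_step maze vb v seen m h hokv
    rw [ih (markWrap v m.1 m.2) hstep]
    simp only [machineV]
    rw [if_pos hokv, if_neg hm]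
    have : bMoves m = movesOf m.1 m.2 := rfl
    rw [this]
  | case5 seen c fs m rest hok ih =>
    have hokv : okMove maze v m = false := by
      rw [← ok_eq maze vb v seen h m]; simpa using hok
    rw [ih v h]
    simp only [machineV]
    rw [if_neg (by simp [hokv])]

lemma vGet_mark_self (v : List (List Bool)) (x y : Int) (hx : 0 ≤ x) (hy : 0 ≤ y) :
    vGet (markWrap v x y) x y = true := by
  unfold vGet markWrap
  have hpx : pyWrap v.length x = x := by unfold pyWrap; rw [if_neg (by omega)]
  rw [hpx]
  by_cases hxr : x.toNat < v.length
  · rw [if_pos ⟨hx, by omega⟩]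
    have hrowD : v.getD x.toNat [] = v[x.toNat] := by
      rw [List.getD_eq_getElem?_getD, getElem?_pos v x.toNat hxr]; rfl
    have hgm : (v.modify x.toNat (fun r => setRow r y)).getD x.toNat []
        = setRow (v.getD x.toNat []) y := by
      rw [hrowD, List.getD_eq_getElem?_getD, List.getElem?_modify,
        getElem?_pos v x.toNat hxr]
      show (if x.toNat = x.toNat then setRow v[x.toNat] y else v[x.toNat])
        = setRow v[x.toNat] y
      rw [if_pos rfl]
    rw [hgm]
    set r := v.getD x.toNat [] with hr
    unfold setRow
    have hpy : pyWrap r.length y = y := by unfold pyWrap; rw [if_neg (by omega)]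
    rw [hpy]
    by_cases hyr : y.toNat < r.length
    · rw [if_pos ⟨hy, by omega⟩, List.getD_eq_getElem?_getD, List.getElem?_set,
        if_pos rfl, if_pos (by simpa [List.length_set] using hyr)]
      rfl
    · rw [if_neg (by omega), List.getD_eq_getElem?_getD, getElem?_neg r y.toNat (by omega)]
      rfl
  · rw [if_neg (by omega)]
    have hrow : v.getD x.toNat [] = [] := by
      rw [List.getD_eq_getElem?_getD, getElem?_neg v x.toNat (by omega)]; rfl
    rw [hrow]
    rfl

lemma Cpl_init (visited : List (List Bool)) (current : Int × Int) :
    Cpl (markWrap visited current.1 current.2) (markWrap visited current.1 current.2)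
      (PySem.Set.ofList [current]) := by
  intro p hp1 hp2
  have hof : PySem.Set.ofList [current] = [current] := rfl
  rw [hof]
  cases hc : PySem.Set.contains [current] p
  · simp
  · have hm : p ∈ [current] := (PySem.Set.contains_iff _ _).mp hc
    have : p = current := by simpa using hm
    subst this
    rw [vGet_mark_self visited p.1 p.2 hp1 hp2]
    rfl

-- ===== VERDICT (by name: the statement is the Claim_ definition above) =====
theorem dfs_spec : Claim_equal_dfs := by
  intro maze current goal visited _hdom _hpre
  unfold Spec_dfs dfs dfs_alt
  by_cases hg : current = goal
  · rw [if_pos hg, if_pos hg]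
  · rw [if_neg hg, if_neg hg,
      machineB_eq_V maze (markWrap visited current.1 current.2) goal current
        [(current, bMoves current)] (PySem.Set.ofList [current])
        (markWrap visited current.1 current.2) (Cpl_init visited current)]
    have hbm : bMoves current = movesOf current.1 current.2 := rfl
    rw [hbm, machineV_KK]
    simp only [KK]
    have hfail := loopA_fail maze goal current (movesOf current.1 current.2)
      (markWrap visited current.1 current.2)
    rcases hL : (loopA maze goal current (movesOf current.1 current.2)
      (markWrap visited current.1 current.2)).val with ⟨⟨vn, p⟩, v'⟩
    rw [hL] at hfail
    simp only [Kc]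
    by_cases hp : p.isEmpty = true
    · have hpnil : p = [] := by
        cases p with
        | nil => rfl
        | cons a q => simp at hp
      have hvn : vn = [current] := by simpa using hfail hp
      simp [hvn, hpnil]
    · simp [hp]
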